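-- pv_equiv track=rewrite | github.com/morcb13-bit/Paper | 2026-03-07-cone‐FFT/Parseval core.py | build_fractal_integer_signal
-- ===== SOURCE A (Python) =====
-- def step_rule_40(T: list[int], U: list[int]) -> tuple[list[int], list[int]]:
--     """1段整数再帰。ノルム係数 40。"""
--     T_next = [6*t + 2*u for t, u in zip(T, U)]
--     U_next = [2*t - 6*u for t, u in zip(T, U)]
--     return T_next, U_next
--
-- def build_fractal_integer_signal(
--     B: int,
--     T0: list[int],
--     U0: list[int],
-- ) -> tuple[list[int], list[int]]:
--     """B段の整数再帰。ノルム係数 40^B。"""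
--     T, U = T0[:], U0[:]
--     for _ in range(B):
--         T, U = step_rule_40(T, U)
--     return T, U
-- ===== SOURCE B (Python) =====
-- def _mat_mul(p, q):
--     a, b, c, d = p
--     e, f, g, h = q
--     return (a*e + b*g, a*f + b*h, c*e + d*g, c*f + d*h)
--
-- def _mat_pow(n):
--     # ((6,2),(2,-6)) ** n by binary exponentiation
--     if n == 0:
--         return (1, 0, 0, 1)
--     half = _mat_pow(n // 2)
--     sq = _mat_mul(half, half)
--     if n % 2 == 1:
--         return _mat_mul((6, 2, 2, -6), sq)
--     return sq
--
-- def build_fractal_integer_signal(B, T0, U0):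
--     if B <= 0:
--         return T0[:], U0[:]
--     a, b, c, d = _mat_pow(B)
--     T = [a*t + b*u for t, u in zip(T0, U0)]
--     U = [c*t + d*u for t, u in zip(T0, U0)]
--     return T, U
-- ===== Notes on version B (the rewrite author's own statement) =====
-- stated objective: faster
-- what changed: Replaces the B-step elementwise loop by binary exponentiation of the 2x2 transform matrix, applied once per element.
import Mathlib
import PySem

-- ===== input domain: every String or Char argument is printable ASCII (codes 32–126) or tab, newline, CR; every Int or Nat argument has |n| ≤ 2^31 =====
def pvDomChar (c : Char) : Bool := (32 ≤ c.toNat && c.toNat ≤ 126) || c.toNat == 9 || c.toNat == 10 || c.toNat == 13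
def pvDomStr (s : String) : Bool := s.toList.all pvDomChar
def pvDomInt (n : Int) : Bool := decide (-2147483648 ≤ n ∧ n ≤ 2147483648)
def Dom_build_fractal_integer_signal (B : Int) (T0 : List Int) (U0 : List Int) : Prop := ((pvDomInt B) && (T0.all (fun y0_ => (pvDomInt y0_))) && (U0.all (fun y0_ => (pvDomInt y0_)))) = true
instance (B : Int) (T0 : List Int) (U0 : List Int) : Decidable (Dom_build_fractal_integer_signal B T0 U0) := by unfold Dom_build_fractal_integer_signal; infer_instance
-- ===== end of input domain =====

-- B replaces A's B elementwise passes by fast (binary) exponentiation of the 2x2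
-- transform matrix, applied once per element (objective: faster).


-- ===== PORT A =====
def step_rule_40 (T : List Int) (U : List Int) : List Int × List Int :=
  (List.zipWith (fun t u => 6*t + 2*u) T U, List.zipWith (fun t u => 2*t - 6*u) T U)

def pvLoopA : Nat → List Int × List Int → List Int × List Int
  | 0, p => p
  | n+1, p => pvLoopA n (step_rule_40 p.1 p.2)

def build_fractal_integer_signal (B : Int) (T0 : List Int) (U0 : List Int) : List Int × List Int :=
  pvLoopA B.toNat (T0, U0)

-- ===== PORT B =====
def pvMatMul (p q : Int × Int × Int × Int) : Int × Int × Int × Int :=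
  (p.1*q.1 + p.2.1*q.2.2.1, p.1*q.2.1 + p.2.1*q.2.2.2,
   p.2.2.1*q.1 + p.2.2.2*q.2.2.1, p.2.2.1*q.2.1 + p.2.2.2*q.2.2.2)

def pvMatPow (n : Nat) : Int × Int × Int × Int :=
  if h : n = 0 then (1, 0, 0, 1)
  else
    let half := pvMatPow (n / 2)
    let sq := pvMatMul half half
    if n % 2 = 1 then pvMatMul (6, 2, 2, -6) sq else sq
termination_by n
decreasing_by exact Nat.div_lt_self (Nat.pos_of_ne_zero h) (by omega)

def build_fractal_integer_signal_alt (B : Int) (T0 : List Int) (U0 : List Int) : List Int × List Int :=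
  if B ≤ 0 then (T0, U0)
  else
    let m := pvMatPow B.toNat
    (List.zipWith (fun t u => m.1*t + m.2.1*u) T0 U0,
     List.zipWith (fun t u => m.2.2.1*t + m.2.2.2*u) T0 U0)

-- ===== PRECONDITION & SPEC =====
def Spec_build_fractal_integer_signal (B : Int) (T0 : List Int) (U0 : List Int) (out : List Int × List Int) : Prop := out = build_fractal_integer_signal_alt B T0 U0
instance (B : Int) (T0 : List Int) (U0 : List Int) (out : List Int × List Int) : Decidable (Spec_build_fractal_integer_signal B T0 U0 out) := by unfold Spec_build_fractal_integer_signal; infer_instance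

-- ===== CLAIM (what is proved, stated in full; the proofs are below) =====
def Claim_equal_build_fractal_integer_signal : Prop := ∀ (B : Int) (T0 : List Int) (U0 : List Int), Dom_build_fractal_integer_signal B T0 U0 → Spec_build_fractal_integer_signal B T0 U0 (build_fractal_integer_signal B T0 U0)

-- ===== LEMMAS AND PROOFS =====

-- naive matrix power, reference for pvMatPow
def pvPow : Nat → Int × Int × Int × Int
  | 0 => (1, 0, 0, 1)
  | n+1 => pvMatMul (6, 2, 2, -6) (pvPow n)

lemma pvMatMul_assoc (p q r : Int × Int × Int × Int) :
    pvMatMul (pvMatMul p q) r = pvMatMul p (pvMatMul q r) := by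
  simp only [pvMatMul, Prod.mk.injEq]
  refine ⟨by ring, by ring, by ring, by ring⟩

lemma pvMatMul_one_left (p : Int × Int × Int × Int) : pvMatMul (1, 0, 0, 1) p = p := by
  simp [pvMatMul]

lemma pvPow_add (a b : Nat) : pvPow (a + b) = pvMatMul (pvPow a) (pvPow b) := by
  induction a with
  | zero => simp [pvPow, pvMatMul_one_left]
  | succ a ih =>
    have : a + 1 + b = (a + b) + 1 := by omega
    rw [this, pvPow, pvPow, ih, pvMatMul_assoc]

lemma pvMatPow_eq (n : Nat) : pvMatPow n = pvPow n := by
  induction n using Nat.strong_induction_on with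
  | _ n ih =>
    rw [pvMatPow]
    by_cases h : n = 0
    · simp [h, pvPow]
    · have hlt : n / 2 < n := Nat.div_lt_self (Nat.pos_of_ne_zero h) (by omega)
      simp only [h, dite_false, ih _ hlt]
      by_cases h2 : n % 2 = 1
      · have hn : n = (n / 2 + n / 2) + 1 := by omega
        simp only [h2, if_true]
        rw [show pvMatMul (6,2,2,-6) (pvMatMul (pvPow (n/2)) (pvPow (n/2)))
              = pvPow ((n/2 + n/2) + 1) by rw [pvPow, pvPow_add], ← hn]
      · have hn : n = n / 2 + n / 2 := by omega
        simp only [h2, if_false]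
        rw [← pvPow_add, ← hn]

lemma zipWith_congr_fun (f g : Int → Int → Int) (h : ∀ t u, f t u = g t u) :
    ∀ (T U : List Int), List.zipWith f T U = List.zipWith g T U := by
  intro T
  induction T with
  | nil => intro U; simp
  | cons t T ih =>
    intro U
    cases U with
    | nil => simp
    | cons u U => simp [h, ih]

lemma zipWith_zipWith_pair (h f g : Int → Int → Int) :
    ∀ (T U : List Int),
      List.zipWith h (List.zipWith f T U) (List.zipWith g T U)
        = List.zipWith (fun t u => h (f t u) (g t u)) T U := by
  intro T
  induction T with
  | nil => intro U; simp
  | cons t T ih =>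
    intro U
    cases U with
    | nil => simp
    | cons u U => simp [ih]

-- applying a 2x2 matrix elementwise to the pair of lists
def pvApply (m : Int × Int × Int × Int) (T U : List Int) : List Int × List Int :=
  (List.zipWith (fun t u => m.1*t + m.2.1*u) T U,
   List.zipWith (fun t u => m.2.2.1*t + m.2.2.2*u) T U)

lemma pvApply_step (P : Int × Int × Int × Int) (T U : List Int) :
    pvApply P (step_rule_40 T U).1 (step_rule_40 T U).2 = pvApply (pvMatMul P (6,2,2,-6)) T U := by
  simp only [pvApply, step_rule_40, zipWith_zipWith_pair, pvMatMul]
  refine congrArg₂ Prod.mk ?_ ?_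
  · exact zipWith_congr_fun _ _ (fun t u => by ring) T U
  · exact zipWith_congr_fun _ _ (fun t u => by ring) T U

lemma pvPow_succ_right (n : Nat) : pvPow (n + 1) = pvMatMul (pvPow n) (6, 2, 2, -6) := by
  have := pvPow_add n 1
  simpa [pvPow, pvMatMul_assoc] using this

lemma pvLoopA_step (n : Nat) : ∀ (T U : List Int),
    pvLoopA n (step_rule_40 T U) = pvApply (pvPow (n + 1)) T U := by
  induction n with
  | zero =>
    intro T U
    simp only [pvLoopA, pvPow, pvApply, step_rule_40, pvMatMul]
    refine congrArg₂ Prod.mk ?_ ?_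
    · exact zipWith_congr_fun _ _ (fun t u => by ring) T U
    · exact zipWith_congr_fun _ _ (fun t u => by ring) T U
  | succ n ih =>
    intro T U
    show pvLoopA n (step_rule_40 (step_rule_40 T U).1 (step_rule_40 T U).2) = _
    rw [ih, pvApply_step, ← pvPow_succ_right]

-- ===== VERDICT (by name: the statement is the Claim_ definition above) =====
theorem build_fractal_integer_signal_spec : Claim_equal_build_fractal_integer_signal := by
  intro B T0 U0 _
  unfold Spec_build_fractal_integer_signal build_fractal_integer_signal build_fractal_integer_signal_alt
  by_cases h : B ≤ 0
  · have : B.toNat = 0 := Int.toNat_of_nonpos h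
    simp [this, h, pvLoopA]
  · have hpos : 0 < B := by omega
    have hne : B.toNat ≠ 0 := by
      have := Int.toNat_of_nonneg (le_of_lt hpos); omega
    obtain ⟨k, hk⟩ := Nat.exists_eq_succ_of_ne_zero hne
    rw [if_neg h, hk]
    show pvLoopA k (step_rule_40 T0 U0) = _
    rw [pvLoopA_step, pvMatPow_eq, pvApply]
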